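-- pv_equiv track=rewrite | github.com/Doctordamage/Fall-2019 | CS2302 Labs/Lab 5/PartB.py | caseCompare
-- ===== SOURCE A (Python) =====
-- def caseCompare(temp):
--     listOfLowerCase = ['a', 'b', 'c', 'd', 'e', 'f', 'g', 'h', 'i', 'j', 'k', 'l', 'n', 'm', 'o', 'p', 'q', 'r', 's',
--                   't', 'u', 'v', 'w', 'x', 'y', 'z']
--     listOfUpperCase = ['A', 'B', 'C', 'D', 'E', 'F', 'G', 'H', 'I', 'J', 'K', 'L', 'N', 'M', 'O', 'P', 'Q', 'R', 'S', 'T',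
--                 'U', 'V', 'W', 'X', 'Y', 'Z']
--     for index in range(len(listOfUpperCase)):
--         if (temp == listOfUpperCase[index]):
--             temp2 = listOfLowerCase[index]
--             return temp2
--     return temp
-- ===== SOURCE B (Python) =====
-- def caseCompare(temp):
--     if isinstance(temp, str) and len(temp) == 1 and 'A' <= temp <= 'Z':
--         return chr(ord(temp) + 32)
--     return temp
-- ===== Notes on version B (the rewrite author's own statement) =====
-- stated objective: idiomatic
-- what changed: Replaces the linear scan over two 26-element letter lists with a closed-form ordinal computation: a single uppercase ASCII letter is lowercased by adding 32 to its code point, everything else is returned unchanged.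
import Mathlib
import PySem

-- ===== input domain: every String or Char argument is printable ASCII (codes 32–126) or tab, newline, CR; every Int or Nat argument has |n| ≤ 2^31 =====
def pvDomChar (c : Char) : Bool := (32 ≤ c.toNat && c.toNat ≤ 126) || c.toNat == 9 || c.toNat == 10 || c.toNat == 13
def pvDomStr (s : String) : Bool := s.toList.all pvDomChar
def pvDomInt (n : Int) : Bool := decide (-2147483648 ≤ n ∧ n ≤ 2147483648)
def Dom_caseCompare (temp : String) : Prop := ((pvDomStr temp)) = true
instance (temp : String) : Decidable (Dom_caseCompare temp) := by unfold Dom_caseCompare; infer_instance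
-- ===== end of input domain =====

-- B replaces A's linear scan over two 26-element letter lists with a closed-form
-- ordinal computation chr(ord(c)+32) guarded by a range check (objective: idiomatic).

-- ===== PORT A =====
def pvLowers : List String :=
  ["a", "b", "c", "d", "e", "f", "g", "h", "i", "j", "k", "l", "n", "m", "o", "p", "q", "r", "s",
   "t", "u", "v", "w", "x", "y", "z"]
def pvUppers : List String :=
  ["A", "B", "C", "D", "E", "F", "G", "H", "I", "J", "K", "L", "N", "M", "O", "P", "Q", "R", "S", "T",
   "U", "V", "W", "X", "Y", "Z"]

-- the 'for index in range(len(listOfUpperCase))' loop, returning early on a match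
def pvLoop (temp : String) : List Int → String
  | [] => temp
  | i :: rest =>
    if temp = PySem.List.pyGetD pvUppers i "" then
      PySem.List.pyGetD pvLowers i ""
    else pvLoop temp rest

def caseCompare (temp : String) : String :=
  pvLoop temp (PySem.List.pyRange 0 (PySem.List.len pvUppers) 1)

-- ===== PORT B =====
-- Source B: if len(temp) == 1 and 'A' <= temp <= 'Z': return chr(ord(temp) + 32); return temp
def caseCompare_alt (temp : String) : String :=
  match temp.toList with
  | [c] => if 'A' ≤ c ∧ c ≤ 'Z' then String.ofList [Char.ofNat (c.toNat + 32)] else temp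
  | _ => temp

-- ===== PRECONDITION & SPEC =====
def Spec_caseCompare (temp : String) (out : String) : Prop := out = caseCompare_alt temp
instance (temp : String) (out : String) : Decidable (Spec_caseCompare temp out) := by unfold Spec_caseCompare; infer_instance

-- ===== CLAIM (what is proved, stated in full; the proofs are below) =====
def Claim_equal_caseCompare : Prop := ∀ (temp : String), Dom_caseCompare temp → Spec_caseCompare temp (caseCompare temp)

-- ===== LEMMAS AND PROOFS =====

-- every uppercase char between 'A' and 'Z' is one of the 26 letters
lemma upper_char_enum (c : Char) (h1 : 'A' ≤ c) (h2 : c ≤ 'Z') :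
    c ∈ ['A','B','C','D','E','F','G','H','I','J','K','L','M','N','O','P','Q','R','S','T','U','V','W','X','Y','Z'] := by
  have hv1 : 65 ≤ c.toNat := h1
  have hv2 : c.toNat ≤ 90 := h2
  have hofnat : Char.ofNat c.toNat = c := Char.ofNat_toNat c
  set n := c.toNat with hn
  rw [← hofnat]
  interval_cases n <;> decide

lemma loop_no_match (temp : String) (l : List Int)
    (h : ∀ i ∈ l, temp ≠ PySem.List.pyGetD pvUppers i "") :
    pvLoop temp l = temp := by
  induction l with
  | nil => rfl
  | cons i rest ih =>
    simp only [pvLoop]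
    rw [if_neg (h i (List.mem_cons_self))]
    exact ih (fun j hj => h j (List.mem_cons_of_mem _ hj))

lemma toList_eq_single (temp : String) (c : Char) (h : temp.toList = [c]) :
    temp = String.ofList [c] := by
  have := congrArg String.ofList h
  simpa using this

theorem caseCompare_eq (temp : String) : caseCompare temp = caseCompare_alt temp := by
  by_cases hmem : temp ∈ pvUppers
  · -- temp is one of the 26 literal uppercase strings: evaluate both sides
    fin_cases hmem <;> decide
  · -- the loop never matches, so A returns temp
    have hloop : caseCompare temp = temp := by
      unfold caseCompare
      apply loop_no_match
      intro i hi
      have hrange : (0 : Int) ≤ i ∧ i < 26 := by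
        simpa [PySem.List.mem_pyRange_one, pvUppers] using hi
      intro heq
      apply hmem
      -- pyGetD at a valid index is a member of pvUppers
      have h0 : 0 ≤ i := hrange.1
      have hlt : i.toNat < pvUppers.length := by
        simp only [pvUppers, List.length]
        omega
      rw [heq, PySem.List.pyGetD_of_nonneg _ _ h0]
      simp only [List.getD_eq_getElem _ _ hlt]
      exact List.getElem_mem hlt
    rw [hloop]
    -- B also returns temp: otherwise temp would be an uppercase letter string
    unfold caseCompare_alt
    cases htl : temp.toList with
    | nil => simp
    | cons c rest =>
      cases rest with
      | cons d rest' => simp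
      | nil =>
        by_cases hc : 'A' ≤ c ∧ c ≤ 'Z'
        · exfalso
          apply hmem
          have hte : temp = String.ofList [c] := toList_eq_single temp c htl
          have henum := upper_char_enum c hc.1 hc.2
          rw [hte]
          fin_cases henum <;> decide
        · simp [hc]

-- ===== VERDICT (by name: the statement is the Claim_ definition above) =====
theorem caseCompare_spec : Claim_equal_caseCompare := by
  intro temp _
  exact caseCompare_eq temp
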